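-- pv_equiv track=rewrite | github.com/n1108/tlab | exp/agent/trace_org.py | detect_self_loops
-- ===== SOURCE A (Python) =====
-- from typing import Dict, List, Optional
--
-- def get_all_children(children_map: Dict) -> set:
--     all_children = set()
--     for children in children_map.values():
--         all_children.update(children)
--     return all_children
--
-- def detect_self_loops(span_map: Dict, children_map: Dict) -> List[List[str]]:
--     visited = set()
--     stack = []
--     loops = []
--
--     def dfs(span_id):
--         if span_id in stack:
--             loop_start = stack.index(span_id)
--             loops.append(stack[loop_start:] + [span_id])
--             return
--         if span_id in visited:
--             return
--         visited.add(span_id)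
--         stack.append(span_id)
--         for child in children_map.get(span_id, []):
--             dfs(child)
--         stack.pop()
--
--     for root in [s for s in span_map if s not in get_all_children(children_map)]:
--         dfs(root)
--     return loops
-- ===== SOURCE B (Python) =====
-- def get_all_children(children_map):
--     all_children = set()
--     for children in children_map.values():
--         all_children.update(children)
--     return all_children
--
-- _SENTINEL = object()
--
-- def detect_self_loops(span_map, children_map):
--     visited = set()
--     loops = []
--     all_children = get_all_children(children_map)
--     for root in span_map:
--         if root in all_children or root in visited:
--             continue
--         visited.add(root)
--         path = [root]
--         frames = [(root, iter(children_map.get(root, [])))]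
--         while frames:
--             sid, it = frames[-1]
--             child = next(it, _SENTINEL)
--             if child is _SENTINEL:
--                 frames.pop()
--                 path.pop()
--                 continue
--             if child in path:
--                 loops.append(path[path.index(child):] + [child])
--             elif child in visited:
--                 continue
--             else:
--                 visited.add(child)
--                 path.append(child)
--                 frames.append((child, iter(children_map.get(child, []))))
--     return loops
-- ===== Notes on version B (the rewrite author's own statement) =====
-- stated objective: faster
-- what changed: A's inner recursive dfs is replaced by an iterative DFS driven by an explicit stack of (span_id, remaining-children-iterator) frames, and the all_children set that A's root comprehension recomputes for every span key is computed once.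
import Mathlib
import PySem

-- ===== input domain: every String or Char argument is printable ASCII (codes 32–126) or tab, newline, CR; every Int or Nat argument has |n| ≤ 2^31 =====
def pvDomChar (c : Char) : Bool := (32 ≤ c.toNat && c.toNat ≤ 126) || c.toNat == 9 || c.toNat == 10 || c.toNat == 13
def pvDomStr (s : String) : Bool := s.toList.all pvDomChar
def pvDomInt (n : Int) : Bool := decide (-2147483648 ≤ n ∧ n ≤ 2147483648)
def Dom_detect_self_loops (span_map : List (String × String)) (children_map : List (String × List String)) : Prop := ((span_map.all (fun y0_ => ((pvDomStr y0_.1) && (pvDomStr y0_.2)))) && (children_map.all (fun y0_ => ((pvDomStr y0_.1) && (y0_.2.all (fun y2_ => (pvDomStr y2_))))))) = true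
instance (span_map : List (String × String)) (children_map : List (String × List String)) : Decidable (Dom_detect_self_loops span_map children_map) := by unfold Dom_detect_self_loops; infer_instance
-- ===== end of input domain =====

-- B replaces A's inner recursive dfs by an iterative DFS over an explicit stack of (span_id,
-- remaining-children) frames and computes the all_children set once instead of once per span key
-- as A's root comprehension does (measured faster for that reason).

-- ===== PORT A =====
-- shared state record: Python's  visited / stack (= B's path) / loops
structure PvSt where
  visited : PySem.Set String
  stack   : List String
  loops   : List (List String)
  deriving Repr, DecidableEq

-- nodes that can ever enter `visited`: span_map's keys and every child; used only to size the fuel guards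
def pvNodes (span_map : List (String × String)) (children_map : List (String × List String)) : List String :=
  PySem.Dict.keys (PySem.Dict.ofList span_map) ++ (PySem.Dict.values (PySem.Dict.ofList children_map)).flatten

def pvGetAllChildren (children_map : List (String × List String)) : PySem.Set String :=
  (PySem.Dict.values (PySem.Dict.ofList children_map)).foldl (fun s cs => PySem.Set.update s cs) PySem.Set.empty

-- Python's recursive dfs; the Nat argument is a recursion-depth guard only (|pvNodes|+1 always suffices)
def pvDfsA (cm : PySem.Dict String (List String)) : Nat → PvSt → String → PvSt
  | 0, st, _ => st
  | d + 1, st, x =>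
    if x ∈ st.stack then
      -- x ∈ stack, so stack.index(x) = index? ≠ none and the getD default is never read
      let loopStart : Nat := (PySem.List.index? st.stack x).getD 0
      { st with loops := st.loops ++ [PySem.List.slice st.stack (some (loopStart : Int)) none ++ [x]] }
    else if PySem.Set.contains st.visited x then st
    else
      let st1 : PvSt := { st with visited := PySem.Set.add st.visited x, stack := st.stack ++ [x] }
      let st2 := (PySem.Dict.getD cm x []).foldl (pvDfsA cm d) st1
      { st2 with stack := st2.stack.dropLast }

def detect_self_loops (span_map : List (String × String)) (children_map : List (String × List String)) : List (List String) :=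
  let cm := PySem.Dict.ofList children_map
  -- Python calls get_all_children(children_map) once per key in the comprehension; it is pure, computed once here
  let allCh := pvGetAllChildren children_map
  let roots := (PySem.Dict.keys (PySem.Dict.ofList span_map)).filter (fun s => !(PySem.Set.contains allCh s))
  let fuel := (pvNodes span_map children_map).length + 1
  (roots.foldl (fun st r => pvDfsA cm fuel st r) ⟨[], [], []⟩).loops

-- ===== PORT B =====
def pvGetAllChildrenAlt (children_map : List (String × List String)) : PySem.Set String :=
  (PySem.Dict.values (PySem.Dict.ofList children_map)).foldl (fun s cs => PySem.Set.update s cs) PySem.Set.empty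

-- step-count guard for the iterative machine (always sufficient; see the proofs below)
def pvFuel (span_map : List (String × String)) (children_map : List (String × List String)) : Nat :=
  let cm := PySem.Dict.ofList children_map
  ((pvNodes span_map children_map).dedup.map (fun x => 1 + (PySem.Dict.getD cm x []).length)).sum
    + ((PySem.Dict.values cm).map List.length).sum + 2

-- Source B's while loop: frames = explicit stack of (span_id, remaining children of its iterator)
def pvMachine (cm : PySem.Dict String (List String)) : Nat → List (String × List String) → PvSt → PvSt
  | 0, _, st => st
  | _ + 1, [], st => st
  | f + 1, (sid, kids) :: rest, st =>
    match kids with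
    | [] => pvMachine cm f rest { st with stack := st.stack.dropLast }
    | c :: ks =>
      if c ∈ st.stack then
        let loopStart : Nat := (PySem.List.index? st.stack c).getD 0
        pvMachine cm f ((sid, ks) :: rest)
          { st with loops := st.loops ++ [PySem.List.slice st.stack (some (loopStart : Int)) none ++ [c]] }
      else if PySem.Set.contains st.visited c then
        pvMachine cm f ((sid, ks) :: rest) st
      else
        pvMachine cm f ((c, PySem.Dict.getD cm c []) :: (sid, ks) :: rest)
          { st with visited := PySem.Set.add st.visited c, stack := st.stack ++ [c] }

def detect_self_loops_alt (span_map : List (String × String)) (children_map : List (String × List String)) : List (List String) :=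
  let cm := PySem.Dict.ofList children_map
  let allCh := pvGetAllChildrenAlt children_map
  let fuel := pvFuel span_map children_map
  ((PySem.Dict.keys (PySem.Dict.ofList span_map)).foldl
    (fun st r =>
      if PySem.Set.contains allCh r || PySem.Set.contains st.visited r then st
      else pvMachine cm fuel [(r, PySem.Dict.getD cm r [])]
             { st with visited := PySem.Set.add st.visited r, stack := [r] })
    ⟨[], [], []⟩).loops

-- ===== PRECONDITION & SPEC =====
def Spec_detect_self_loops (span_map : List (String × String)) (children_map : List (String × List String)) (out : List (List String)) : Prop := out = detect_self_loops_alt span_map children_map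
instance (span_map : List (String × String)) (children_map : List (String × List String)) (out : List (List String)) : Decidable (Spec_detect_self_loops span_map children_map out) := by unfold Spec_detect_self_loops; infer_instance

-- ===== CLAIM (what is proved, stated in full; the proofs are below) =====
def Claim_equal_detect_self_loops : Prop := ∀ (span_map : List (String × String)) (children_map : List (String × List String)), Dom_detect_self_loops span_map children_map → Spec_detect_self_loops span_map children_map (detect_self_loops span_map children_map)

-- ===== LEMMAS AND PROOFS =====

-- number of not-yet-visited nodes (each counted once)
def pvUnvis (nodes : List String) (v : PySem.Set String) : List String :=
  nodes.dedup.filter (fun x => decide (x ∉ v))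

-- potential of a machine configuration: every machine step strictly decreases it
def pvPhi (cm : PySem.Dict String (List String)) (nodes : List String)
    (frames : List (String × List String)) (v : PySem.Set String) : Nat :=
  ((pvUnvis nodes v).map (fun x => 1 + (PySem.Dict.getD cm x []).length)).sum
    + (frames.map (fun p => 1 + p.2.length)).sum

-- what the machine computes, phrased with A's recursion: run the remaining children of each frame, then pop
def pvUnwind (cm : PySem.Dict String (List String)) (D : Nat)
    (frames : List (String × List String)) (st : PvSt) : PvSt :=
  frames.foldl (fun s p =>
    let s2 := p.2.foldl (pvDfsA cm D) s
    { s2 with stack := s2.stack.dropLast }) st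

lemma pv_stackA (cm : PySem.Dict String (List String)) :
    ∀ (d : Nat) (st : PvSt) (x : String), (pvDfsA cm d st x).stack = st.stack := by
  intro d
  induction d with
  | zero => intro st x; rfl
  | succ d ih =>
    intro st x
    have hf : ∀ (cs : List String) (s : PvSt), ((cs.foldl (pvDfsA cm d) s).stack = s.stack) := by
      intro cs
      induction cs with
      | nil => intro s; rfl
      | cons c cs ihc => intro s; rw [List.foldl_cons, ihc, ih]
    show (pvDfsA cm (d+1) st x).stack = st.stack
    rw [pvDfsA]
    split_ifs with h1 h2
    · rfl
    · rfl
    · simp only [hf, List.dropLast_concat]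

lemma pv_stackA_fold (cm : PySem.Dict String (List String)) (d : Nat) :
    ∀ (cs : List String) (st : PvSt), ((cs.foldl (pvDfsA cm d) st).stack = st.stack) := by
  intro cs
  induction cs with
  | nil => intro st; rfl
  | cons c cs ihc => intro st; rw [List.foldl_cons, ihc, pv_stackA]

lemma pv_visA (cm : PySem.Dict String (List String)) :
    ∀ (d : Nat) (st : PvSt) (x : String), st.visited ⊆ (pvDfsA cm d st x).visited := by
  intro d
  induction d with
  | zero => intro st x; exact fun _ h => h
  | succ d ih =>
    have hf : ∀ (cs : List String) (s : PvSt), s.visited ⊆ (cs.foldl (pvDfsA cm d) s).visited := by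
      intro cs
      induction cs with
      | nil => intro s; exact fun _ h => h
      | cons c cs ihc => intro s; rw [List.foldl_cons]; exact fun a ha => ihc _ (ih _ _ ha)
    intro st x
    show st.visited ⊆ (pvDfsA cm (d+1) st x).visited
    rw [pvDfsA]
    split_ifs with h1 h2
    · exact fun _ h => h
    · exact fun _ h => h
    · intro a ha
      refine hf _ _ ?_
      show a ∈ PySem.Set.add st.visited x
      exact (PySem.Set.mem_add _ _ _).2 (Or.inl ha)

lemma pv_unvis_mono (nodes : List String) {v v' : PySem.Set String} (h : v ⊆ v') :
    (pvUnvis nodes v').length ≤ (pvUnvis nodes v).length := by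
  have hs : List.Sublist (pvUnvis nodes v') (pvUnvis nodes v) := by
    refine List.monotone_filter_right _ ?_
    intro a ha
    simp only [decide_eq_true_eq] at ha ⊢
    exact fun hm => ha (h hm)
  exact hs.length_le

lemma pv_unvis_lt (nodes : List String) {v : PySem.Set String} {x : String}
    (hx : x ∈ nodes) (hv : x ∈ v) : (pvUnvis nodes v).length < nodes.length := by
  have hx' : x ∈ nodes.dedup := List.mem_dedup.2 hx
  have hpx : (fun y => decide (y ∉ v)) x = false := by simp [hv]
  have hs : List.Sublist (pvUnvis nodes v) nodes.dedup := List.filter_sublist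
  have hlt : (pvUnvis nodes v).length < nodes.dedup.length := by
    rcases Nat.lt_or_ge (pvUnvis nodes v).length nodes.dedup.length with h | h
    · exact h
    · exfalso
      have heq : pvUnvis nodes v = nodes.dedup :=
        (List.Sublist.length_eq hs).mp (Nat.le_antisymm hs.length_le h)
      have : x ∈ pvUnvis nodes v := heq ▸ hx'
      have := List.mem_filter.1 this
      simp [hv] at this
  exact Nat.lt_of_lt_of_le hlt (List.Sublist.length_le (List.dedup_sublist _))

lemma pv_unvis_add_lt (nodes : List String) {v : PySem.Set String} {x : String}
    (hx : x ∈ nodes) (hxv : x ∉ v) :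
    (pvUnvis nodes (PySem.Set.add v x)).length < (pvUnvis nodes v).length := by
  have hs : List.Sublist (pvUnvis nodes (PySem.Set.add v x)) (pvUnvis nodes v) := by
    refine List.monotone_filter_right _ ?_
    intro a ha
    simp only [decide_eq_true_eq] at ha ⊢
    exact fun hm => ha ((PySem.Set.mem_add v x a).2 (Or.inl hm))
  rcases Nat.lt_or_ge (pvUnvis nodes (PySem.Set.add v x)).length (pvUnvis nodes v).length with h | h
  · exact h
  · exfalso
    have heq : pvUnvis nodes (PySem.Set.add v x) = pvUnvis nodes v :=
      (List.Sublist.length_eq hs).mp (Nat.le_antisymm hs.length_le h)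
    have hxin : x ∈ pvUnvis nodes v := List.mem_filter.2 ⟨List.mem_dedup.2 hx, by simp [hxv]⟩
    have : x ∈ pvUnvis nodes (PySem.Set.add v x) := heq ▸ hxin
    have := (List.mem_filter.1 this).2
    simp only [decide_eq_true_eq] at this
    exact this ((PySem.Set.mem_add v x x).2 (Or.inr rfl))

-- fuel irrelevance for A's dfs: any two sufficient depth guards give the same result
lemma pv_fuel_irrel (cm : PySem.Dict String (List String)) (nodes : List String)
    (hvals : ∀ (x c : String), c ∈ PySem.Dict.getD cm x [] → c ∈ nodes) :
    ∀ (d₁ d₂ : Nat) (st : PvSt) (x : String), x ∈ nodes →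
      (pvUnvis nodes st.visited).length < d₁ → (pvUnvis nodes st.visited).length < d₂ →
      pvDfsA cm d₁ st x = pvDfsA cm d₂ st x := by
  intro d₁
  induction d₁ with
  | zero => intro d₂ st x _ h1 _; exact absurd h1 (Nat.not_lt_zero _)
  | succ d ih =>
    intro d₂ st x hx h1 h2
    cases d₂ with
    | zero => exact absurd h2 (Nat.not_lt_zero _)
    | succ e =>
      show pvDfsA cm (d+1) st x = pvDfsA cm (e+1) st x
      rw [pvDfsA, pvDfsA]
      split_ifs with hst hv
      · rfl
      · rfl
      · have hxv : x ∉ st.visited := fun hm => hv ((PySem.Set.contains_iff _ _).2 hm)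
        have hlt := pv_unvis_add_lt nodes hx hxv
        have hd : (pvUnvis nodes (PySem.Set.add st.visited x)).length < d := by omega
        have he : (pvUnvis nodes (PySem.Set.add st.visited x)).length < e := by omega
        have haux : ∀ (cs : List String) (s : PvSt), (∀ c ∈ cs, c ∈ nodes) →
            (pvUnvis nodes s.visited).length < d → (pvUnvis nodes s.visited).length < e →
            cs.foldl (pvDfsA cm d) s = cs.foldl (pvDfsA cm e) s := by
          intro cs
          induction cs with
          | nil => intro s _ _ _; rfl
          | cons c cs ihc =>
            intro s hcs hd' he'
            rw [List.foldl_cons, List.foldl_cons, ih e s c (hcs c (List.mem_cons_self)) hd' he']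
            exact ihc _ (fun c' h => hcs c' (List.mem_cons_of_mem _ h))
              (Nat.lt_of_le_of_lt (pv_unvis_mono nodes (pv_visA cm e s c)) hd')
              (Nat.lt_of_le_of_lt (pv_unvis_mono nodes (pv_visA cm e s c)) he')
        have := haux (PySem.Dict.getD cm x []) { st with visited := PySem.Set.add st.visited x, stack := st.stack ++ [x] }
          (fun c h => hvals x c h) hd he
        simp only [this]

lemma pv_fuel_irrel_fold (cm : PySem.Dict String (List String)) (nodes : List String)
    (hvals : ∀ (x c : String), c ∈ PySem.Dict.getD cm x [] → c ∈ nodes)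
    (d₁ d₂ : Nat) :
    ∀ (cs : List String) (st : PvSt), (∀ c ∈ cs, c ∈ nodes) →
      (pvUnvis nodes st.visited).length < d₁ → (pvUnvis nodes st.visited).length < d₂ →
      cs.foldl (pvDfsA cm d₁) st = cs.foldl (pvDfsA cm d₂) st := by
  intro cs
  induction cs with
  | nil => intro st _ _ _; rfl
  | cons c cs ihc =>
    intro st hcs h1 h2
    rw [List.foldl_cons, List.foldl_cons, pv_fuel_irrel cm nodes hvals d₁ d₂ st c (hcs c (List.mem_cons_self)) h1 h2]
    exact ihc _ (fun c' h => hcs c' (List.mem_cons_of_mem _ h))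
      (Nat.lt_of_le_of_lt (pv_unvis_mono nodes (pv_visA cm d₂ st c)) h1)
      (Nat.lt_of_le_of_lt (pv_unvis_mono nodes (pv_visA cm d₂ st c)) h2)

-- every child list looked up in cm consists of nodes
lemma pv_getD_sub (span_map : List (String × String)) (children_map : List (String × List String)) :
    ∀ (x c : String), c ∈ PySem.Dict.getD (PySem.Dict.ofList children_map) x [] →
      c ∈ pvNodes span_map children_map := by
  intro x c hc
  cases hcont : PySem.Dict.contains (PySem.Dict.ofList children_map) x with
  | false =>
    rw [PySem.Dict.getD_of_not_contains _ [] hcont] at hc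
    cases hc
  | true =>
    have hsome : ((PySem.Dict.ofList children_map).get? x).isSome := by
      rw [← PySem.Dict.contains_eq_isSome_get?]; exact hcont
    obtain ⟨v, hv⟩ := Option.isSome_iff_exists.1 hsome
    rw [PySem.Dict.getD_of_get?_eq_some _ [] hv] at hc
    have hit := PySem.Dict.mem_items_of_get?_eq_some _ hv
    have hval : v ∈ PySem.Dict.values (PySem.Dict.ofList children_map) :=
      List.mem_map_of_mem hit
    exact List.mem_append_right _ (List.mem_flatten.2 ⟨v, hval, hc⟩)

lemma pv_sum_filter_split (l : List String) (hl : l.Nodup) (c : String) (v : PySem.Set String)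
    (hc : c ∈ l) (hv : c ∉ v) (f : String → Nat) :
    ((l.filter (fun x => decide (x ∉ v))).map f).sum
      = f c + ((l.filter (fun x => decide (x ∉ PySem.Set.add v c))).map f).sum := by
  induction l with
  | nil => cases hc
  | cons a l ih =>
    have hnd := List.nodup_cons.1 hl
    by_cases hac : a = c
    · subst hac
      have h1 : (fun x => decide (x ∉ v)) a = true := by simp [hv]
      have h2 : (fun x => decide (x ∉ PySem.Set.add v a)) a = false := by
        simp [(PySem.Set.mem_add v a a).2 (Or.inr rfl)]
      rw [show List.filter (fun x => decide (x ∉ v)) (a :: l) = a :: List.filter (fun x => decide (x ∉ v)) l from List.filter_cons_of_pos h1,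
         show List.filter (fun x => decide (x ∉ PySem.Set.add v a)) (a :: l) = List.filter (fun x => decide (x ∉ PySem.Set.add v a)) l from List.filter_cons_of_neg (show ¬ decide (a ∉ PySem.Set.add v a) = true by simp)]
      have hfe : l.filter (fun x => decide (x ∉ PySem.Set.add v a)) = l.filter (fun x => decide (x ∉ v)) := by
        refine List.filter_congr ?_
        intro x hx
        have hxa : x ≠ a := fun he => hnd.1 (he ▸ hx)
        simp only [decide_eq_decide]
        constructor
        · exact fun hn hm => hn ((PySem.Set.mem_add v a x).2 (Or.inl hm))
        · intro hn hm
          rcases (PySem.Set.mem_add v a x).1 hm with h | h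
          · exact hn h
          · exact hxa h
      rw [hfe]
      simp [List.map_cons]
    · have hc' : c ∈ l := by
        rcases List.mem_cons.1 hc with h | h
        · exact absurd h.symm hac
        · exact h
      have hq : ((fun x => decide (x ∉ PySem.Set.add v c)) a) = ((fun x => decide (x ∉ v)) a) := by
        simp only [decide_eq_decide]
        constructor
        · exact fun hn hm => hn ((PySem.Set.mem_add v c a).2 (Or.inl hm))
        · intro hn hm
          rcases (PySem.Set.mem_add v c a).1 hm with h | h
          · exact hn h
          · exact hac h
      by_cases hpa : a ∈ v
      · rw [show List.filter (fun x => decide (x ∉ v)) (a :: l) = List.filter (fun x => decide (x ∉ v)) l from List.filter_cons_of_neg (by simp [hpa]),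
           show List.filter (fun x => decide (x ∉ PySem.Set.add v c)) (a :: l) = List.filter (fun x => decide (x ∉ PySem.Set.add v c)) l from
             List.filter_cons_of_neg (by simp only [decide_eq_true_eq, Decidable.not_not]; exact (PySem.Set.mem_add v c a).2 (Or.inl hpa))]
        exact ih hnd.2 hc'
      · rw [show List.filter (fun x => decide (x ∉ v)) (a :: l) = a :: List.filter (fun x => decide (x ∉ v)) l from List.filter_cons_of_pos (by simp [hpa]),
           show List.filter (fun x => decide (x ∉ PySem.Set.add v c)) (a :: l) = a :: List.filter (fun x => decide (x ∉ PySem.Set.add v c)) l from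
             List.filter_cons_of_pos (show decide (a ∉ PySem.Set.add v c) = true from hq.trans (by simp [hpa]))]
        simp only [List.map_cons, List.sum_cons]
        rw [ih hnd.2 hc']
        omega

lemma pv_unwind_pop (cm : PySem.Dict String (List String)) (D : Nat) (x : String)
    (rest : List (String × List String)) (st : PvSt) :
    pvUnwind cm D ((x, []) :: rest) st = pvUnwind cm D rest { st with stack := st.stack.dropLast } := by
  simp [pvUnwind]

lemma pv_unwind_child (cm : PySem.Dict String (List String)) (D : Nat) (x c : String)
    (cs : List String) (rest : List (String × List String)) (st : PvSt) :
    pvUnwind cm D ((x, c :: cs) :: rest) st = pvUnwind cm D ((x, cs) :: rest) (pvDfsA cm D st c) := by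
  simp [pvUnwind]

lemma pv_unwind_cons (cm : PySem.Dict String (List String)) (D : Nat) (x : String)
    (cs : List String) (rest : List (String × List String)) (st : PvSt) :
    pvUnwind cm D ((x, cs) :: rest) st
      = pvUnwind cm D rest
          { cs.foldl (pvDfsA cm D) st with stack := (cs.foldl (pvDfsA cm D) st).stack.dropLast } := by
  simp [pvUnwind]

-- the simulation: with enough fuel the machine computes pvUnwind
lemma pv_sim (cm : PySem.Dict String (List String)) (nodes : List String)
    (hvals : ∀ (x c : String), c ∈ PySem.Dict.getD cm x [] → c ∈ nodes) :
    ∀ (mf : Nat) (frames : List (String × List String)) (st : PvSt),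
      (∀ p ∈ frames, ∀ c ∈ p.2, c ∈ nodes) →
      pvPhi cm nodes frames st.visited ≤ mf →
      pvMachine cm mf frames st = pvUnwind cm (nodes.length + 1) frames st := by
  intro mf
  induction mf with
  | zero =>
    intro frames st hinv hphi
    cases frames with
    | nil => rfl
    | cons p rest =>
      exfalso
      simp only [pvPhi, List.map_cons, List.sum_cons] at hphi
      omega
  | succ f ih =>
    intro frames st hinv hphi
    cases frames with
    | nil => rfl
    | cons p rest =>
      obtain ⟨sid, kids⟩ := p
      cases kids with
      | nil =>
        show pvMachine cm f rest { st with stack := st.stack.dropLast } = _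
        rw [pv_unwind_pop]
        refine ih rest _ (fun q hq => hinv q (List.mem_cons_of_mem _ hq)) ?_
        simp only [pvPhi, List.map_cons, List.sum_cons, List.length_nil] at hphi ⊢
        omega
      | cons c ks =>
        have hcnodes : c ∈ nodes := hinv (sid, c :: ks) (List.mem_cons_self) c (List.mem_cons_self)
        rw [pv_unwind_child]
        by_cases hcs : c ∈ st.stack
        · have hstep : pvMachine cm (f+1) ((sid, c :: ks) :: rest) st
              = pvMachine cm f ((sid, ks) :: rest)
                  { st with loops := st.loops ++ [PySem.List.slice st.stack (some (((PySem.List.index? st.stack c).getD 0 : Nat) : Int)) none ++ [c]] } := by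
            simp only [pvMachine]
            rw [if_pos hcs]
          have hdfs : pvDfsA cm (nodes.length + 1) st c
              = { st with loops := st.loops ++ [PySem.List.slice st.stack (some (((PySem.List.index? st.stack c).getD 0 : Nat) : Int)) none ++ [c]] } := by
            rw [pvDfsA]; rw [if_pos hcs]
          rw [hstep, hdfs]
          refine ih _ _ (fun q hq => by
            rcases List.mem_cons.1 hq with h | h
            · subst h; exact fun c' hc' => hinv (sid, c :: ks) (List.mem_cons_self) c' (List.mem_cons_of_mem _ hc')
            · exact hinv q (List.mem_cons_of_mem _ h)) ?_
          simp only [pvPhi, List.map_cons, List.sum_cons, List.length_cons] at hphi ⊢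
          omega
        · by_cases hvv : c ∈ st.visited
          · have hcont : PySem.Set.contains st.visited c = true := (PySem.Set.contains_iff _ _).2 hvv
            have hstep : pvMachine cm (f+1) ((sid, c :: ks) :: rest) st
                = pvMachine cm f ((sid, ks) :: rest) st := by
              simp only [pvMachine]
              rw [if_neg hcs, if_pos hcont]
            have hdfs : pvDfsA cm (nodes.length + 1) st c = st := by
              rw [pvDfsA]; rw [if_neg hcs, if_pos hcont]
            rw [hstep, hdfs]
            refine ih _ _ (fun q hq => by
              rcases List.mem_cons.1 hq with h | h
              · subst h; exact fun c' hc' => hinv (sid, c :: ks) (List.mem_cons_self) c' (List.mem_cons_of_mem _ hc')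
              · exact hinv q (List.mem_cons_of_mem _ h)) ?_
            simp only [pvPhi, List.map_cons, List.sum_cons, List.length_cons] at hphi ⊢
            omega
          · have hcont : PySem.Set.contains st.visited c = false := by
              cases h : PySem.Set.contains st.visited c
              · rfl
              · exact absurd ((PySem.Set.contains_iff _ _).1 h) hvv
            set st2 : PvSt := { st with visited := PySem.Set.add st.visited c, stack := st.stack ++ [c] } with hst2
            have hstep : pvMachine cm (f+1) ((sid, c :: ks) :: rest) st
                = pvMachine cm f ((c, PySem.Dict.getD cm c []) :: (sid, ks) :: rest) st2 := by
              simp only [pvMachine]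
              rw [if_neg hcs, if_neg (by simpa using hvv)]
            have hvislt : (pvUnvis nodes st2.visited).length < nodes.length := by
              refine pv_unvis_lt nodes hcnodes ?_
              exact (PySem.Set.mem_add _ _ _).2 (Or.inr rfl)
            have hdfs : pvDfsA cm (nodes.length + 1) st c
                = { (PySem.Dict.getD cm c []).foldl (pvDfsA cm (nodes.length + 1)) st2 with
                    stack := ((PySem.Dict.getD cm c []).foldl (pvDfsA cm (nodes.length + 1)) st2).stack.dropLast } := by
              rw [pvDfsA]; rw [if_neg hcs, if_neg (by simpa using hvv)]
              have hfold : (PySem.Dict.getD cm c []).foldl (pvDfsA cm nodes.length) st2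
                  = (PySem.Dict.getD cm c []).foldl (pvDfsA cm (nodes.length + 1)) st2 := by
                refine pv_fuel_irrel_fold cm nodes hvals _ _ _ _ (fun c' hc' => hvals c c' hc') hvislt (Nat.lt_succ_of_lt hvislt)
              simp only [hst2] at hfold
              dsimp only
              rw [hfold]
            rw [hstep, hdfs, ← pv_unwind_cons]
            refine ih _ _ (fun q hq => by
              rcases List.mem_cons.1 hq with h | h
              · subst h; exact fun c' hc' => hvals c c' hc'
              · rcases List.mem_cons.1 h with h2 | h2
                · subst h2; exact fun c' hc' => hinv (sid, c :: ks) (List.mem_cons_self) c' (List.mem_cons_of_mem _ hc')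
                · exact hinv q (List.mem_cons_of_mem _ h2)) ?_
            have hsplit := pv_sum_filter_split nodes.dedup (List.nodup_dedup _) c st.visited
              (List.mem_dedup.2 hcnodes) hvv (fun x => 1 + (PySem.Dict.getD cm x []).length)
            simp only [pvPhi, pvUnvis, List.map_cons, List.sum_cons, List.length_cons] at hphi ⊢
            simp only [hst2]
            omega


lemma pv_getD_len_le (children_map : List (String × List String)) (r : String) :
    (PySem.Dict.getD (PySem.Dict.ofList children_map) r []).length
      ≤ ((PySem.Dict.values (PySem.Dict.ofList children_map)).map List.length).sum := by
  cases hcont : PySem.Dict.contains (PySem.Dict.ofList children_map) r with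
  | false => rw [PySem.Dict.getD_of_not_contains _ [] hcont]; exact Nat.zero_le _
  | true =>
    have hsome : ((PySem.Dict.ofList children_map).get? r).isSome := by
      rw [← PySem.Dict.contains_eq_isSome_get?]; exact hcont
    obtain ⟨v, hv⟩ := Option.isSome_iff_exists.1 hsome
    rw [PySem.Dict.getD_of_get?_eq_some _ [] hv]
    have hval : v ∈ PySem.Dict.values (PySem.Dict.ofList children_map) :=
      List.mem_map_of_mem (PySem.Dict.mem_items_of_get?_eq_some _ hv)
    exact List.le_sum_of_mem (List.mem_map_of_mem hval)

lemma pv_phi_le_fuel (span_map : List (String × String)) (children_map : List (String × List String))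
    (v : PySem.Set String) (r : String) :
    pvPhi (PySem.Dict.ofList children_map) (pvNodes span_map children_map)
        [(r, PySem.Dict.getD (PySem.Dict.ofList children_map) r [])] v
      ≤ pvFuel span_map children_map := by
  have h1 : ((pvUnvis (pvNodes span_map children_map) v).map
        (fun x => 1 + (PySem.Dict.getD (PySem.Dict.ofList children_map) x []).length)).sum
      ≤ (((pvNodes span_map children_map).dedup).map
        (fun x => 1 + (PySem.Dict.getD (PySem.Dict.ofList children_map) x []).length)).sum := by
    refine List.Sublist.sum_le_sum (List.Sublist.map _ (List.filter_sublist)) ?_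
    intro a _; exact Nat.zero_le _
  have h2 := pv_getD_len_le children_map r
  simp only [pvPhi, pvFuel, List.map_cons, List.sum_cons, List.map_nil, List.sum_nil]
  omega

-- ===== VERDICT (by name: the statement is the Claim_ definition above) =====
theorem detect_self_loops_spec : Claim_equal_detect_self_loops := by
  intro span_map children_map _
  unfold Spec_detect_self_loops detect_self_loops detect_self_loops_alt
  dsimp only
  have hgac : pvGetAllChildrenAlt children_map = pvGetAllChildren children_map := rfl
  rw [hgac]
  have hvals := pv_getD_sub span_map children_map
  rw [← PySem.List.foldl_if_eq_foldl_filter (fun s => !(PySem.Set.contains (pvGetAllChildren children_map) s))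
        (fun st r => pvDfsA (PySem.Dict.ofList children_map) ((pvNodes span_map children_map).length + 1) st r)]
  have main : ∀ (l : List String) (st : PvSt), st.stack = [] →
      (∀ r ∈ l, r ∈ pvNodes span_map children_map) →
      l.foldl (fun st r => if (!(PySem.Set.contains (pvGetAllChildren children_map) r)) = true
            then pvDfsA (PySem.Dict.ofList children_map) ((pvNodes span_map children_map).length + 1) st r else st) st
        = l.foldl (fun st r =>
            if (PySem.Set.contains (pvGetAllChildren children_map) r || PySem.Set.contains st.visited r) = true then st
            else pvMachine (PySem.Dict.ofList children_map) (pvFuel span_map children_map)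
                [(r, PySem.Dict.getD (PySem.Dict.ofList children_map) r [])]
                { st with visited := PySem.Set.add st.visited r, stack := [r] }) st := by
    intro l
    induction l with
    | nil => intro st _ _; rfl
    | cons r l ih =>
      intro st hstack hmem
      simp only [List.foldl_cons]
      have hmem' : ∀ r' ∈ l, r' ∈ pvNodes span_map children_map :=
        fun r' h => hmem r' (List.mem_cons_of_mem _ h)
      cases hall : PySem.Set.contains (pvGetAllChildren children_map) r with
      | true =>
        have eA : (if (!true) = true
            then pvDfsA (PySem.Dict.ofList children_map) ((pvNodes span_map children_map).length + 1) st r else st) = st := by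
          simp
        have eB : (if (true || PySem.Set.contains st.visited r) = true then st
            else pvMachine (PySem.Dict.ofList children_map) (pvFuel span_map children_map)
                [(r, PySem.Dict.getD (PySem.Dict.ofList children_map) r [])]
                { st with visited := PySem.Set.add st.visited r, stack := [r] }) = st := by
          simp
        rw [eA, eB]
        exact ih st hstack hmem'
      | false =>
        have hrn : r ∈ pvNodes span_map children_map := hmem r (List.mem_cons_self)
        cases hvis : PySem.Set.contains st.visited r with
        | true =>
          have hA : pvDfsA (PySem.Dict.ofList children_map) ((pvNodes span_map children_map).length + 1) st r = st := by
            rw [pvDfsA]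
            rw [if_neg (by rw [hstack]; simp), if_pos hvis]
          have eA : (if (!false) = true
              then pvDfsA (PySem.Dict.ofList children_map) ((pvNodes span_map children_map).length + 1) st r else st) = st := by
            simp [hA]
          have eB : (if (false || true) = true then st
              else pvMachine (PySem.Dict.ofList children_map) (pvFuel span_map children_map)
                  [(r, PySem.Dict.getD (PySem.Dict.ofList children_map) r [])]
                  { st with visited := PySem.Set.add st.visited r, stack := [r] }) = st := by
            simp
          rw [eA, eB]
          exact ih st hstack hmem'
        | false =>
          have hrv : r ∉ st.visited := fun h => by
            rw [(PySem.Set.contains_iff _ _).2 h] at hvis; cases hvis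
          have hvislt : (pvUnvis (pvNodes span_map children_map)
              (PySem.Set.add st.visited r)).length < (pvNodes span_map children_map).length :=
            pv_unvis_lt _ hrn ((PySem.Set.mem_add _ _ _).2 (Or.inr rfl))
          have hA : pvDfsA (PySem.Dict.ofList children_map) ((pvNodes span_map children_map).length + 1) st r
              = pvUnwind (PySem.Dict.ofList children_map) ((pvNodes span_map children_map).length + 1)
                  [(r, PySem.Dict.getD (PySem.Dict.ofList children_map) r [])]
                  { st with visited := PySem.Set.add st.visited r, stack := [r] } := by
            rw [pvDfsA]
            rw [if_neg (by rw [hstack]; simp), if_neg (by simpa using hrv)]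
            rw [pv_unwind_cons]
            simp only [pvUnwind, List.foldl_nil]
            have hfold := pv_fuel_irrel_fold (PySem.Dict.ofList children_map) (pvNodes span_map children_map)
              hvals (pvNodes span_map children_map).length ((pvNodes span_map children_map).length + 1)
              (PySem.Dict.getD (PySem.Dict.ofList children_map) r [])
              { st with visited := PySem.Set.add st.visited r, stack := st.stack ++ [r] }
              (fun c hc => hvals r c hc)
              (by rw [show ({ st with visited := PySem.Set.add st.visited r, stack := st.stack ++ [r] } : PvSt).visited
                    = PySem.Set.add st.visited r from rfl]; exact hvislt)
              (by rw [show ({ st with visited := PySem.Set.add st.visited r, stack := st.stack ++ [r] } : PvSt).visited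
                    = PySem.Set.add st.visited r from rfl]; exact Nat.lt_succ_of_lt hvislt)
            rw [hfold, hstack]
            simp only [List.nil_append]
          have hB : pvMachine (PySem.Dict.ofList children_map) (pvFuel span_map children_map)
                [(r, PySem.Dict.getD (PySem.Dict.ofList children_map) r [])]
                { st with visited := PySem.Set.add st.visited r, stack := [r] }
              = pvUnwind (PySem.Dict.ofList children_map) ((pvNodes span_map children_map).length + 1)
                  [(r, PySem.Dict.getD (PySem.Dict.ofList children_map) r [])]
                  { st with visited := PySem.Set.add st.visited r, stack := [r] } := by
            refine pv_sim _ _ hvals _ _ _ ?_ ?_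
            · intro p hp c hc
              rcases List.mem_cons.1 hp with h | h
              · subst h; exact hvals r c hc
              · cases h
            · exact pv_phi_le_fuel span_map children_map _ r
          have eA : (if (!false) = true
              then pvDfsA (PySem.Dict.ofList children_map) ((pvNodes span_map children_map).length + 1) st r else st)
              = pvUnwind (PySem.Dict.ofList children_map) ((pvNodes span_map children_map).length + 1)
                  [(r, PySem.Dict.getD (PySem.Dict.ofList children_map) r [])]
                  { st with visited := PySem.Set.add st.visited r, stack := [r] } := by
            simpa using hA
          have eB : (if (false || false) = true then st
              else pvMachine (PySem.Dict.ofList children_map) (pvFuel span_map children_map)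
                  [(r, PySem.Dict.getD (PySem.Dict.ofList children_map) r [])]
                  { st with visited := PySem.Set.add st.visited r, stack := [r] })
              = pvUnwind (PySem.Dict.ofList children_map) ((pvNodes span_map children_map).length + 1)
                  [(r, PySem.Dict.getD (PySem.Dict.ofList children_map) r [])]
                  { st with visited := PySem.Set.add st.visited r, stack := [r] } := by
            rw [if_neg (by simp), hB]
          rw [eA, eB]
          have hstk : (pvUnwind (PySem.Dict.ofList children_map) ((pvNodes span_map children_map).length + 1)
                  [(r, PySem.Dict.getD (PySem.Dict.ofList children_map) r [])]
                  { st with visited := PySem.Set.add st.visited r, stack := [r] }).stack = [] := by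
            rw [pv_unwind_cons]
            simp [pvUnwind, pv_stackA_fold]
          exact ih _ hstk hmem'
  rw [main (PySem.Dict.keys (PySem.Dict.ofList span_map)) ⟨[], [], []⟩ rfl
    (fun r h => List.mem_append_left _ h)]
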